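-- pv_equiv track=rewrite | github.com/xionter/python-defrag | analysis/analyser.py | free_extents
-- ===== SOURCE A (Python) =====
-- from typing import List, Tuple, Dict, Optional
-- from typing import List, Tuple, Dict, Optional
--
-- def free_extents(bitmap: List[int]) -> List[Tuple[int, int]]:
--     out: List[Tuple[int,int]] = []
--     i, n = 0, len(bitmap)
--     while i < n:
--         if bitmap[i] == 0:
--             j = i
--             while j < n and bitmap[j] == 0:
--                 j += 1
--             out.append((i + 2, j - i))
--             i = j
--         else:
--             i += 1
--     return out
-- ===== SOURCE B (Python) =====
-- def free_extents(bitmap):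
--     n = len(bitmap)
--     starts = [i for i in range(n) if bitmap[i] == 0 and (i == 0 or bitmap[i - 1] != 0)]
--     ends = [i for i in range(n) if bitmap[i] == 0 and (i == n - 1 or bitmap[i + 1] != 0)]
--     return [(s + 2, e - s + 1) for s, e in zip(starts, ends)]
-- ===== Notes on version B (the rewrite author's own statement) =====
-- stated objective: alternative
-- what changed: Instead of A's nested while-loop scan that walks each run, B detects run boundaries declaratively: it builds the list of left boundaries of zero runs and the list of right boundaries in two comprehensions over indices, then zips them into (start+2, length) pairs.
import Mathlib
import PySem

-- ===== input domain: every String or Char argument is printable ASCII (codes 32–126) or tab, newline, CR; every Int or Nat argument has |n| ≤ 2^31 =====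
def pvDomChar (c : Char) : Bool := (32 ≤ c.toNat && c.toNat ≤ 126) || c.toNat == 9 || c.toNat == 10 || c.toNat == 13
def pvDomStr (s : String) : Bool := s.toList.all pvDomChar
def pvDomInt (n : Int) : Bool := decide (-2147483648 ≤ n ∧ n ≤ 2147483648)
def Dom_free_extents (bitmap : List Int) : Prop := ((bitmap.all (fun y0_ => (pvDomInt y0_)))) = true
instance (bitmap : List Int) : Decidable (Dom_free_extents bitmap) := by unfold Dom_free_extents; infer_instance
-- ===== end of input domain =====

-- B finds left and right boundaries of zero runs in two index comprehensions and zips them;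
-- A walks runs with nested while loops. Same return value; an alternative algorithm, not claimed faster.

-- ===== PORT A =====
-- A's inner while: count of leading zeros (how far j advances past i).
def pvLeadZeros : List Int → Nat
  | [] => 0
  | x :: xs => if x = 0 then 1 + pvLeadZeros xs else 0

-- A's outer while, recursion over the suffix with the running index i (j - i = 1 + pvLeadZeros xs).
def pvFreeA (i : Int) : List Int → List (Int × Int)
  | [] => []
  | x :: xs =>
      if x = 0 then
        let k : Nat := 1 + pvLeadZeros xs
        (i + 2, (k : Int)) :: pvFreeA (i + (k : Int)) (xs.drop (pvLeadZeros xs))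
      else
        pvFreeA (i + 1) xs
termination_by l => l.length
decreasing_by
  · simp
  · simp

def free_extents (bitmap : List Int) : List (Int × Int) := pvFreeA 0 bitmap

-- ===== PORT B =====
-- [i for i in range(n) if bitmap[i] == 0 and (i == 0 or bitmap[i-1] != 0)]
-- (indices are always in range, so getD is an exact port of Python's bitmap[i])
def pvStarts (bitmap : List Int) : List Nat :=
  (List.range bitmap.length).filter
    (fun i => bitmap.getD i 0 == 0 && (i == 0 || bitmap.getD (i - 1) 0 != 0))

-- [i for i in range(n) if bitmap[i] == 0 and (i == n-1 or bitmap[i+1] != 0)]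
def pvEnds (bitmap : List Int) : List Nat :=
  (List.range bitmap.length).filter
    (fun i => bitmap.getD i 0 == 0 && (i == bitmap.length - 1 || bitmap.getD (i + 1) 0 != 0))

-- [(s + 2, e - s + 1) for s, e in zip(starts, ends)]
def free_extents_alt (bitmap : List Int) : List (Int × Int) :=
  ((pvStarts bitmap).zip (pvEnds bitmap)).map
    (fun se => ((se.1 : Int) + 2, (se.2 : Int) - (se.1 : Int) + 1))

-- ===== PRECONDITION & SPEC =====
def Spec_free_extents (bitmap : List Int) (out : List (Int × Int)) : Prop := out = free_extents_alt bitmap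
instance (bitmap : List Int) (out : List (Int × Int)) : Decidable (Spec_free_extents bitmap out) := by unfold Spec_free_extents; infer_instance

-- ===== CLAIM (what is proved, stated in full; the proofs are below) =====
def Claim_equal_free_extents : Prop := ∀ (bitmap : List Int), Dom_free_extents bitmap → Spec_free_extents bitmap (free_extents bitmap)

-- ===== LEMMAS AND PROOFS =====

-- starts-predicate over a suffix xs whose predecessor element is prev
def pvS (prev : Int) (xs : List Int) : List Nat :=
  (List.range xs.length).filter
    (fun j => xs.getD j 0 == 0 && (prev :: xs).getD j 0 != 0)

-- A's result with starting offset i, expressed through B's boundary lists (proof-only)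
def pvT (i : Int) (xs : List Int) : List (Int × Int) :=
  ((pvStarts xs).zip (pvEnds xs)).map
    (fun se => (i + (se.1 : Int) + 2, (se.2 : Int) - (se.1 : Int) + 1))

theorem pv_filter_range_succ (p : Nat → Bool) (n : Nat) :
    (List.range (n + 1)).filter p =
      (if p 0 then [0] else []) ++ ((List.range n).filter (fun j => p (j + 1))).map (· + 1) := by
  rw [List.range_succ_eq_map, List.filter_cons]
  have : (List.map (· + 1) (List.range n)).filter p
      = ((List.range n).filter (fun j => p (j + 1))).map (· + 1) := by
    rw [List.filter_map]
    rfl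
  rw [this]
  split_ifs <;> simp

theorem pvStarts_cons (x : Int) (xs : List Int) :
    pvStarts (x :: xs) = (if x = 0 then [0] else []) ++ (pvS x xs).map (· + 1) := by
  unfold pvStarts pvS
  rw [List.length_cons, pv_filter_range_succ]
  congr 1
  · by_cases hx : x = 0 <;> simp [hx]

theorem pvS_cons (prev y : Int) (ys : List Int) :
    pvS prev (y :: ys) = (if y = 0 ∧ prev ≠ 0 then [0] else []) ++ (pvS y ys).map (· + 1) := by
  unfold pvS
  rw [List.length_cons, pv_filter_range_succ]
  congr 1
  · by_cases hy : y = 0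
    · by_cases hp : prev = 0 <;> simp [hy, hp]
    · simp [hy]

theorem pvS_eq_pvStarts (prev : Int) (h : prev ≠ 0) (xs : List Int) :
    pvS prev xs = pvStarts xs := by
  cases xs with
  | nil => rfl
  | cons y ys =>
      rw [pvS_cons, pvStarts_cons]
      congr 1
      split_ifs with h1 h2 h2 <;> first | rfl | (exfalso; tauto)

theorem pvEnds_cons (y : Int) (ys : List Int) :
    pvEnds (y :: ys) =
      (if y = 0 ∧ (ys = [] ∨ ys.getD 0 0 ≠ 0) then [0] else []) ++ (pvEnds ys).map (· + 1) := by
  unfold pvEnds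
  rw [List.length_cons, pv_filter_range_succ]
  congr 1
  · cases ys with
    | nil => simp
    | cons z zs =>
        simp only [List.getD_cons_succ, List.getD_cons_zero, List.length_cons]
        by_cases hy : y = 0
        · by_cases hz : z = 0 <;> simp [hy, hz]
        · simp [hy]
  · congr 1
    apply List.filter_congr
    intro j hj
    simp only [List.mem_range] at hj
    simp only [List.getD_cons_succ, Nat.add_sub_cancel]
    congr 1
    congr 1
    rw [Bool.eq_iff_iff]
    simp only [beq_iff_eq]
    omega

theorem pvS_zeros (zs rest : List Int) (hz : ∀ y ∈ zs, y = 0)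
    (hr : rest = [] ∨ rest.getD 0 0 ≠ 0) :
    pvS 0 (zs ++ rest) = (pvStarts rest).map (· + zs.length) := by
  induction zs with
  | nil =>
      simp only [List.nil_append, List.length_nil]
      have : pvS 0 rest = pvStarts rest := by
        cases rest with
        | nil => rfl
        | cons r rt =>
            have hr0 : r ≠ 0 := by simpa using hr
            rw [pvS_cons, pvStarts_cons]
            simp [hr0]
      rw [this]
      simp
  | cons z zs ih =>
      have hz0 : z = 0 := hz z (by simp)
      rw [List.cons_append, hz0, pvS_cons]
      rw [ih (fun y hy => hz y (by simp [hy]))]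
      simp only [List.map_map, List.length_cons]
      simp only [ne_eq, not_true_eq_false, and_false, if_false, List.nil_append]
      apply List.map_congr_left
      intro a _
      simp
      omega

theorem pvEnds_zeros (z : Int) (zs rest : List Int) (hz0 : z = 0) (hz : ∀ y ∈ zs, y = 0)
    (hr : rest = [] ∨ rest.getD 0 0 ≠ 0) :
    pvEnds ((z :: zs) ++ rest) = zs.length :: (pvEnds rest).map (· + (zs.length + 1)) := by
  induction zs generalizing z with
  | nil =>
      rw [List.cons_append, List.nil_append, pvEnds_cons, if_pos ⟨hz0, hr⟩]
      simp
  | cons z' zs ih =>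
      have hz' : z' = 0 := hz z' (by simp)
      rw [List.cons_append, pvEnds_cons]
      have hcond : ¬ (z = 0 ∧ ((z' :: zs) ++ rest = [] ∨ ((z' :: zs) ++ rest).getD 0 0 ≠ 0)) := by
        simp [hz']
      rw [if_neg hcond]
      rw [ih z' hz' (fun y hy => hz y (by simp [hy]))]
      simp only [List.map_cons, List.map_map, List.nil_append, List.length_cons]
      congr 1

theorem pvLeadZeros_eq (xs : List Int) :
    pvLeadZeros xs = (xs.takeWhile (fun y => y == (0:Int))).length := by
  induction xs with
  | nil => rfl
  | cons x xs ih =>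
      by_cases hx : x = 0
      · simp [pvLeadZeros, hx, ih]; omega
      · simp [pvLeadZeros, hx]

theorem drop_len_takeWhile (p : Int → Bool) (xs : List Int) :
    xs.drop (xs.takeWhile p).length = xs.dropWhile p := by
  induction xs with
  | nil => rfl
  | cons x xs ih =>
      by_cases h : p x <;> simp [List.takeWhile, List.dropWhile, h, ih]

theorem pvFreeA_eq_pvT (n : Nat) : ∀ xs : List Int, xs.length ≤ n → ∀ i : Int,
    pvFreeA i xs = pvT i xs := by
  induction n with
  | zero =>
      intro xs h i
      have : xs = [] := List.eq_nil_of_length_eq_zero (Nat.le_zero.mp h)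
      subst this
      rw [pvFreeA.eq_def]
      rfl
  | succ n ih =>
      intro xs h i
      cases xs with
      | nil => rw [pvFreeA.eq_def]; rfl
      | cons x xs =>
          have hlen : xs.length ≤ n := Nat.lt_succ_iff.mp h
          by_cases hx : x = 0
          · -- zero run: x :: takeWhile zeros, then rest
            subst hx
            set zs := xs.takeWhile (fun y => y == (0:Int)) with hzs
            set rest := xs.dropWhile (fun y => y == (0:Int)) with hrest
            have hsplit : xs = zs ++ rest := (List.takeWhile_append_dropWhile).symm
            have hzall : ∀ y ∈ zs, y = 0 := by
              intro y hy
              have := List.mem_takeWhile_imp hy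
              simpa using this
            have hrcond : rest = [] ∨ rest.getD 0 0 ≠ 0 := by
              cases hr : rest with
              | nil => exact Or.inl rfl
              | cons r rt =>
                  right
                  have : ¬ (r == (0:Int)) = true := by
                    have := List.head?_dropWhile_not (fun y => y == (0:Int)) xs
                    rw [← hrest, hr] at this
                    simpa using this
                  simpa using this
            rw [pvFreeA.eq_def]
            simp only [reduceIte]
            have hm : pvLeadZeros xs = zs.length := by rw [pvLeadZeros_eq, hzs]
            have hdrop : xs.drop (pvLeadZeros xs) = rest := by
              rw [hm, hzs, hrest, drop_len_takeWhile]
            rw [hdrop, hm]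
            rw [ih rest (le_trans (by rw [hrest]; exact List.length_dropWhile_le _ _) hlen)]
            -- now compute pvT i (0 :: xs)
            unfold pvT
            have hS : pvStarts ((0:Int) :: xs) = 0 :: (pvStarts rest).map (· + (zs.length + 1)) := by
              rw [pvStarts_cons]
              rw [if_pos rfl]
              conv_lhs => rw [hsplit]
              rw [pvS_zeros zs rest hzall hrcond]
              simp only [List.map_map, List.cons_append, List.nil_append]
              congr 1
            have hE : pvEnds ((0:Int) :: xs) = zs.length :: (pvEnds rest).map (· + (zs.length + 1)) := by
              conv_lhs => rw [hsplit]
              exact pvEnds_zeros 0 zs rest rfl hzall hrcond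
            rw [hS, hE]
            simp only [List.zip_cons_cons, List.zip_map, List.map_cons, List.map_map]
            refine List.cons_eq_cons.mpr ⟨?_, ?_⟩
            · simp only [Prod.mk.injEq]
              refine ⟨by push_cast; ring, by push_cast; ring⟩
            · apply List.map_congr_left
              intro se _
              simp only [Function.comp_apply, Prod.map, Prod.mk.injEq]
              refine ⟨by push_cast; ring, by push_cast; ring⟩
          · -- nonzero head: skip one
            rw [pvFreeA.eq_def]
            simp only [if_neg hx]
            rw [ih xs hlen]
            unfold pvT
            have hS : pvStarts (x :: xs) = (pvStarts xs).map (· + 1) := by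
              rw [pvStarts_cons, if_neg hx, pvS_eq_pvStarts x hx]
              simp
            have hE : pvEnds (x :: xs) = (pvEnds xs).map (· + 1) := by
              rw [pvEnds_cons]
              have : ¬ (x = 0 ∧ (xs = [] ∨ xs.getD 0 0 ≠ 0)) := by tauto
              rw [if_neg this]
              simp
            rw [hS, hE, List.zip_map, List.map_map]
            apply List.map_congr_left
            intro se _
            simp only [Function.comp_apply, Prod.map, Prod.mk.injEq]
            refine ⟨by push_cast; ring, by push_cast; ring⟩

-- ===== VERDICT (by name: the statement is the Claim_ definition above) =====
theorem free_extents_spec : Claim_equal_free_extents := by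
  intro bitmap _
  unfold Spec_free_extents free_extents free_extents_alt
  rw [pvFreeA_eq_pvT bitmap.length bitmap le_rfl 0]
  unfold pvT
  apply List.map_congr_left
  intro se _
  simp
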